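-- pv_equiv track=rewrite | github.com/parnapraveen/DSC180A_Replication_Project | docs/exercises/practice-exercises.py | get_next_recommended_exercise
-- ===== SOURCE A (Python) =====
-- from typing import Any, Dict, List, cast
--
-- EXERCISE_PROGRESSION: Dict[str, Dict[str, Any]] = {
--     "beginner": {
--         "requirements": [],
--         "exercises": ["1.1", "1.2"],
--         "next_level": "intermediate",
--     },
--     "intermediate": {
--         "requirements": ["1.1", "1.2"],
--         "exercises": ["2.1", "2.2"],
--         "next_level": "advanced",
--     },
--     "advanced": {
--         "requirements": ["1.1", "1.2", "2.1", "2.2"],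
--         "exercises": ["3.1", "3.2"],
--         "next_level": "expert",
--     },
--     "expert": {
--         "requirements": ["1.1", "1.2", "2.1", "2.2", "3.1", "3.2"],
--         "exercises": ["4.1", "4.2"],
--         "next_level": None,
--     },
-- }
--
-- def check_prerequisites(completed_exercises: list[str], target_level: str) -> bool:
--     """Check if user has completed prerequisites for target level."""
--     if target_level not in EXERCISE_PROGRESSION:
--         return False
--
--     required = EXERCISE_PROGRESSION[target_level]["requirements"]
--     return all(ex in completed_exercises for ex in required)
--
-- def get_next_recommended_exercise(completed_exercises: list[str]) -> str:
--     """Recommend the next exercise based on completed work."""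
--     for level, info in EXERCISE_PROGRESSION.items():
--         if check_prerequisites(completed_exercises, level):
--             exercises = cast(List[str], info.get("exercises", []))
--             for exercise_id in exercises:
--                 if exercise_id not in completed_exercises:
--                     return exercise_id
--     return "4.2"  # Default to final exercise
-- ===== SOURCE B (Python) =====
-- ALL_EXERCISES = ["1.1", "1.2", "2.1", "2.2", "3.1", "3.2", "4.1", "4.2"]
--
-- def get_next_recommended_exercise(completed_exercises: list[str]) -> str:
--     """Recommend the next exercise based on completed work."""
--     for exercise_id in ALL_EXERCISES:
--         if exercise_id not in completed_exercises:
--             return exercise_id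
--     return "4.2"
-- ===== Notes on version B (the rewrite author's own statement) =====
-- stated objective: simpler
-- what changed: Replaced the level-by-level prerequisite-checked search (and the check_prerequisites helper) with one flat scan over the ordered exercise list, returning the first exercise not yet completed; this is equivalent because each level's requirements are exactly the earlier levels' exercises.
import Mathlib
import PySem

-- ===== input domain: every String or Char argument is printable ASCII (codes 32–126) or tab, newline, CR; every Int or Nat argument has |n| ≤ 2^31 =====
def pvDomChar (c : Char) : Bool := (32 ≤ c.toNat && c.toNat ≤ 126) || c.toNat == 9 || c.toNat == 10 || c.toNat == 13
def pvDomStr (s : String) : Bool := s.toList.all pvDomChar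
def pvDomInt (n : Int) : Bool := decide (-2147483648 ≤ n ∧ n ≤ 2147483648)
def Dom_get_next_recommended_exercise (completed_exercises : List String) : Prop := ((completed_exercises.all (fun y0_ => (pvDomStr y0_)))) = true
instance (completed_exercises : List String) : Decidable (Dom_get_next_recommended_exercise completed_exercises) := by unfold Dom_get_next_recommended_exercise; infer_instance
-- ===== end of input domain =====

-- B replaces A's level-by-level prerequisite-checked search with a single flat scan over the
-- ordered exercise list (objective: simpler); return values proved equal on all inputs.

-- ===== PORT A =====
-- EXERCISE_PROGRESSION: level ↦ (requirements, exercises, next_level); dict as assoc list, first-match lookup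
def pvProg : List (String × (List String × List String × Option String)) :=
  [("beginner", ([], ["1.1", "1.2"], some "intermediate")),
   ("intermediate", (["1.1", "1.2"], ["2.1", "2.2"], some "advanced")),
   ("advanced", (["1.1", "1.2", "2.1", "2.2"], ["3.1", "3.2"], some "expert")),
   ("expert", (["1.1", "1.2", "2.1", "2.2", "3.1", "3.2"], ["4.1", "4.2"], none))]

-- dict lookup (EXERCISE_PROGRESSION[k], with the 'k in dict' test folded in as Option)
def pvLookup (k : String) : List (String × (List String × List String × Option String)) →
    Option (List String × List String × Option String)
  | [] => none
  | (k', v) :: rest => if k' == k then some v else pvLookup k rest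

def check_prerequisites (completed_exercises : List String) (target_level : String) : Bool :=
  match pvLookup target_level pvProg with
  | none => false
  | some info => info.1.all (fun ex => completed_exercises.contains ex)

-- inner loop: first exercise of the level not yet completed
def pvFirstUncompleted (exercises completed : List String) : Option String :=
  match exercises with
  | [] => none
  | e :: es => if completed.contains e then pvFirstUncompleted es completed else some e

-- outer loop over the (ordered) dict items
def pvGoA (completed : List String) :
    List (String × (List String × List String × Option String)) → String
  | [] => "4.2"
  | (level, info) :: rest =>
    if check_prerequisites completed level then
      match pvFirstUncompleted info.2.1 completed with
      | some e => e
      | none => pvGoA completed rest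
    else pvGoA completed rest

def get_next_recommended_exercise (completed_exercises : List String) : String :=
  pvGoA completed_exercises pvProg

-- ===== PORT B =====
def pvAllExercises : List String := ["1.1", "1.2", "2.1", "2.2", "3.1", "3.2", "4.1", "4.2"]

def pvGoB (completed : List String) : List String → String
  | [] => "4.2"
  | e :: es => if completed.contains e then pvGoB completed es else e

def get_next_recommended_exercise_alt (completed_exercises : List String) : String :=
  pvGoB completed_exercises pvAllExercises

-- ===== PRECONDITION & SPEC =====
def Spec_get_next_recommended_exercise (completed_exercises : List String) (out : String) : Prop := out = get_next_recommended_exercise_alt completed_exercises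
instance (completed_exercises : List String) (out : String) : Decidable (Spec_get_next_recommended_exercise completed_exercises out) := by unfold Spec_get_next_recommended_exercise; infer_instance

-- ===== CLAIM (what is proved, stated in full; the proofs are below) =====
def Claim_equal_get_next_recommended_exercise : Prop := ∀ (completed_exercises : List String), Dom_get_next_recommended_exercise completed_exercises → Spec_get_next_recommended_exercise completed_exercises (get_next_recommended_exercise completed_exercises)

-- ===== LEMMAS AND PROOFS =====
theorem chkB (c : List String) : check_prerequisites c "beginner" = true := by
  simp [check_prerequisites, pvProg, pvLookup]

theorem chkI (c : List String) :
    check_prerequisites c "intermediate" = (c.contains "1.1" && c.contains "1.2") := by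
  simp [check_prerequisites, pvProg, pvLookup, List.all]

theorem chkA (c : List String) :
    check_prerequisites c "advanced" =
      (c.contains "1.1" && (c.contains "1.2" && (c.contains "2.1" && c.contains "2.2"))) := by
  simp [check_prerequisites, pvProg, pvLookup, List.all]

theorem chkE (c : List String) :
    check_prerequisites c "expert" =
      (c.contains "1.1" && (c.contains "1.2" && (c.contains "2.1" &&
        (c.contains "2.2" && (c.contains "3.1" && c.contains "3.2"))))) := by
  simp [check_prerequisites, pvProg, pvLookup, List.all]

theorem pv_equal (c : List String) :
    get_next_recommended_exercise c = get_next_recommended_exercise_alt c := by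
  unfold get_next_recommended_exercise get_next_recommended_exercise_alt
  simp only [pvProg, pvAllExercises, pvGoA, pvGoB, pvFirstUncompleted, chkB, chkI, chkA, chkE]
  generalize c.contains "1.1" = b1
  generalize c.contains "1.2" = b2
  generalize c.contains "2.1" = b3
  generalize c.contains "2.2" = b4
  generalize c.contains "3.1" = b5
  generalize c.contains "3.2" = b6
  generalize c.contains "4.1" = b7
  generalize c.contains "4.2" = b8
  revert b1 b2 b3 b4 b5 b6 b7 b8
  decide

-- ===== VERDICT (by name: the statement is the Claim_ definition above) =====
theorem get_next_recommended_exercise_spec : Claim_equal_get_next_recommended_exercise := by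
  intro c _
  exact pv_equal c
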